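-- pv_equiv track=rewrite | github.com/fgerzer/apsis | code/apsis/utilities/benchmark_functions.py | _gen_close_indices_rec
-- ===== SOURCE A (Python) =====
-- def _gen_close_indices_rec(x, max_dist, dims, points):
--     """
--     Recursively generates a list of closest indices to consider for the noise smoothing.
--
--     Parameters
--     ----------
--     x_indices : list
--         The list of indices for each dimension around which to consider the
--         indices.
--     max_dist : int
--         The maximum distance (in indices) around x for which to consider items.
--     dims : int
--         The dimensions of x.
--     points : int
--         The number of points per dimension
--
--     Returns
--     -------
--     list_indices : list of tuples
--         A list of lists as indices which are closest to x.
--     """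
--     list_indices = []
--     if len(x) == 1:
--         for i in range(-max_dist, max_dist+1):
--             list_indices.append([int(i + x[0])])
--     else:
--         list_prev_dim = _gen_close_indices_rec(x[1:], max_dist, dims-1, points)
--         for i in range(len(list_prev_dim)):
--             for j in range(-max_dist, max_dist+1):
--                 to_append = [int(j + x[0])] + list_prev_dim[i][:]
--                 #to_append = [int(j + x[0])] + list_prev_dim[i]
--                 list_indices.append(to_append)
--     return list_indices
-- ===== SOURCE B (Python) =====
-- def _gen_close_indices_rec(x, max_dist, dims, points):
--     """Iterative product build: process dimensions left to right, appending the
--     new coordinate at the end of each row; new-dimension value varies slowest,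
--     so earlier coordinates vary fastest, matching the recursive version."""
--     rows = [[]]
--     for xi in x:
--         vals = [int(o + xi) for o in range(-max_dist, max_dist + 1)]
--         rows = [row + [v] for v in vals for row in rows]
--     return rows
-- ===== Notes on version B (the rewrite author's own statement) =====
-- stated objective: simpler
-- what changed: Replaces the right-to-left recursion with nested append loops by a single left-to-right iterative product build (rows extended by appending each new dimension's value, new value varying slowest).
import Mathlib
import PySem

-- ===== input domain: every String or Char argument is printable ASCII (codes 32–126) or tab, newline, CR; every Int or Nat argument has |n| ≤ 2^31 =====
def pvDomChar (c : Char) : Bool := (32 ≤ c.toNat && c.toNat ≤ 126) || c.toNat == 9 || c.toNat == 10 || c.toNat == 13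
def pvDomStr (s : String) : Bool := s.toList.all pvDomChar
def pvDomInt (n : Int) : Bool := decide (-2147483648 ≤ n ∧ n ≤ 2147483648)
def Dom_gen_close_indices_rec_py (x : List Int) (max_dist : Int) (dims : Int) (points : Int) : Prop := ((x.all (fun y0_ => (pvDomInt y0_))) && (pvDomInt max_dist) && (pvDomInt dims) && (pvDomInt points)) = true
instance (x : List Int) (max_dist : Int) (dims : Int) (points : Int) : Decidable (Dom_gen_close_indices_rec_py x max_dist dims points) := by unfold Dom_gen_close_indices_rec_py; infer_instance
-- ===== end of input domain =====

-- B replaces A's right-to-left recursion (nested append loops per dimension) by a single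
-- left-to-right iterative product build; same cost, simpler ("objective": simpler).


-- ===== PORT A =====
-- literal transliteration of _gen_close_indices_rec; on x = [] Python recurses forever
-- (RecursionError), excluded by Pre_; the [] branch value is never claimed about.
def gen_close_indices_rec_py (x : List Int) (max_dist : Int) (dims : Int) (points : Int) : List (List Int) :=
  match x with
  | [] => []
  | [x0] =>
      (PySem.List.pyRange (-max_dist) (max_dist + 1) 1).foldl
        (fun acc i => acc ++ [[i + x0]]) []
  | x0 :: x1 :: rest =>
      let prev := gen_close_indices_rec_py (x1 :: rest) max_dist (dims - 1) points
      (PySem.List.pyRange 0 (prev.length : Int) 1).foldl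
        (fun acc i =>
          (PySem.List.pyRange (-max_dist) (max_dist + 1) 1).foldl
            (fun acc2 j => acc2 ++ [(j + x0) :: PySem.List.pyGetD prev i []]) acc) []

-- ===== PORT B =====
def gen_close_indices_rec_py_alt (x : List Int) (max_dist : Int) (dims : Int) (points : Int) : List (List Int) :=
  x.foldl
    (fun rows xi =>
      ((PySem.List.pyRange (-max_dist) (max_dist + 1) 1).map (fun o => o + xi)).flatMap
        (fun v => rows.map (fun row => row ++ [v])))
    [[]]

-- ===== PRECONDITION & SPEC =====
-- Pre_ excludes x = [], on which A recurses into x[1:] = [] forever and raises RecursionError.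
def Pre_gen_close_indices_rec_py (x : List Int) (max_dist : Int) (dims : Int) (points : Int) : Prop := x ≠ []
instance (x : List Int) (max_dist : Int) (dims : Int) (points : Int) : Decidable (Pre_gen_close_indices_rec_py x max_dist dims points) := by unfold Pre_gen_close_indices_rec_py; infer_instance
def pvWitness_gen_close_indices_rec_py : List Int × Int × Int × Int := ([0, 3], 1, 2, 5)

def Spec_gen_close_indices_rec_py (x : List Int) (max_dist : Int) (dims : Int) (points : Int) (out : List (List Int)) : Prop := out = gen_close_indices_rec_py_alt x max_dist dims points
instance (x : List Int) (max_dist : Int) (dims : Int) (points : Int) (out : List (List Int)) : Decidable (Spec_gen_close_indices_rec_py x max_dist dims points out) := by unfold Spec_gen_close_indices_rec_py; infer_instance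

-- ===== CLAIM (what is proved, stated in full; the proofs are below) =====
def Claim_equal_gen_close_indices_rec_py : Prop := ∀ (x : List Int) (max_dist : Int) (dims : Int) (points : Int), Dom_gen_close_indices_rec_py x max_dist dims points → Pre_gen_close_indices_rec_py x max_dist dims points → Spec_gen_close_indices_rec_py x max_dist dims points (gen_close_indices_rec_py x max_dist dims points)

-- ===== LEMMAS AND PROOFS =====

theorem pvFlatMap_singleton {α β : Type} (f : α → β) (l : List α) :
    l.flatMap (fun a => [f a]) = l.map f := by
  induction l with
  | nil => rfl
  | cons h t ih => simp [List.flatMap_cons, ih]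

-- canonical front-recursive product: same order as A's result
def pvP (m : Int) : List Int → List (List Int)
  | [] => [[]]
  | x0 :: rest =>
      (pvP m rest).flatMap
        (fun row => (PySem.List.pyRange (-m) (m + 1) 1).map (fun j => (j + x0) :: row))

theorem pvA_eq_pvP (m d p : Int) (x : List Int) (hx : x ≠ []) :
    gen_close_indices_rec_py x m d p = pvP m x := by
  induction x generalizing d with
  | nil => exact absurd rfl hx
  | cons x0 rest ih =>
    cases rest with
    | nil =>
        simp [gen_close_indices_rec_py, pvP, ← List.flatMap_def, pvFlatMap_singleton]
    | cons x1 rest' =>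
        rw [gen_close_indices_rec_py]
        rw [PySem.List.foldl_pyRange_zero_pyGetD'
            (gen_close_indices_rec_py (x1 :: rest') m (d - 1) p) []
            (fun acc row =>
              (PySem.List.pyRange (-m) (m + 1) 1).foldl
                (fun acc2 j => acc2 ++ [(j + x0) :: row]) acc) []]
        rw [ih (d - 1) (by simp)]
        simp only [PySem.List.foldl_append_singleton_eq_map,
          PySem.List.foldl_append_eq_flatMap]
        simp [pvP]

theorem pvB_foldl (m : Int) (x : List Int) :
    ∀ rows : List (List Int),
      x.foldl
        (fun rows xi =>
          ((PySem.List.pyRange (-m) (m + 1) 1).map (fun o => o + xi)).flatMap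
            (fun v => rows.map (fun row => row ++ [v]))) rows
      = (pvP m x).flatMap (fun t => rows.map (fun r => r ++ t)) := by
  induction x with
  | nil => intro rows; simp [pvP]
  | cons x0 xs ih =>
    intro rows
    rw [List.foldl_cons, ih]
    simp [pvP, List.flatMap_assoc, List.map_flatMap, List.flatMap_map, List.map_map,
      Function.comp_def, List.append_assoc]

theorem pvB_eq_pvP (m d p : Int) (x : List Int) :
    gen_close_indices_rec_py_alt x m d p = pvP m x := by
  rw [gen_close_indices_rec_py_alt, pvB_foldl]
  simp

-- ===== VERDICT (by name: the statement is the Claim_ definition above) =====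
theorem gen_close_indices_rec_py_spec : Claim_equal_gen_close_indices_rec_py := by
  intro x m d p _ hpre
  unfold Spec_gen_close_indices_rec_py
  rw [pvA_eq_pvP m d p x hpre, pvB_eq_pvP]
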